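-- pv_equiv track=rewrite | github.com/jaseempaloth/Leetcode_repo | stack.py | reverse_parentheses_1
-- ===== SOURCE A (Python) =====
-- def reverse_parentheses_1(s: str) -> str:
--     pair = {}
--     stack = []
--     for i, c in enumerate(s):
--         if c == '(':
--             stack.append(i)
--         elif c == ')':
--             j = stack.pop()
--             pair[i] = j
--             pair[j] = i
--
--     i, direction = 0, 1
--     result = []
--     while i < len(s):
--         if s[i] == '(' or s[i] == ')':
--             i = pair[i]
--             direction = -direction
--         else:
--             result.append(s[i])
--         i += direction
--     return ''.join(result)
-- ===== SOURCE B (Python) =====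
-- def reverse_parentheses_1(s: str) -> str:
--     frames = [[]]
--     for c in s:
--         if c == '(':
--             frames.append([])
--         elif c == ')':
--             top = frames.pop()
--             frames[-1].extend(reversed(top))
--         else:
--             frames[-1].append(c)
--     return ''.join(frames[0])
-- ===== Notes on version B (the rewrite author's own statement) =====
-- stated objective: simpler
-- what changed: Replaces A's two-pass algorithm (build a matching-pair index with a stack, then walk the string through the pairs flipping direction) with a single forward pass over a stack of partial-result frames: push an empty frame on '(', pop-reverse-extend on ')', append other chars to the top frame.
import Mathlib
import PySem

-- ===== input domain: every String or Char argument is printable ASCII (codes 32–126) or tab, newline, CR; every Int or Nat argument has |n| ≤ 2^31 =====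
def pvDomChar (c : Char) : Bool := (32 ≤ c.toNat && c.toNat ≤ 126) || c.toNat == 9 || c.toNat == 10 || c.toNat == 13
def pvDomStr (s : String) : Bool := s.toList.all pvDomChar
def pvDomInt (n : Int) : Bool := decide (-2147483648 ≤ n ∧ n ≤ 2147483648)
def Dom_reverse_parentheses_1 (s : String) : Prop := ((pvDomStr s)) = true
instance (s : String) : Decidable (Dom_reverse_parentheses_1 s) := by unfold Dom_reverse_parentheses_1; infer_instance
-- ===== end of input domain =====

-- B replaces A's two-pass pair-map + direction-flipping traversal with a single pass over a
-- stack of partial-result frames; equivalence is proved on balanced strings (elsewhere A raises).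

-- ===== PORT A =====

-- A's while loop: state (i, direction, result); fuel makes it total (on balanced input,
-- Pre_, the loop runs exactly len(s) iterations, so fuel len(s)+1 is never exhausted).
-- pair-lookup `none` = Python KeyError, pyGet? `none` = IndexError (both outside Pre_).
def loopA (l : List Char) (pair : PySem.Dict Int Int) :
    Nat → Int → Int → List Char → List Char
  | 0, _, _, result => result
  | fuel + 1, i, direction, result =>
    if i < (l.length : Int) then
      match PySem.List.pyGet? l i with
      | none => result
      | some c =>
        if c = '(' ∨ c = ')' then
          match pair.get? i with
          | none => result
          | some j => loopA l pair fuel (j + -direction) (-direction) result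
        else
          loopA l pair fuel (i + direction) direction (result ++ [c])
    else result

-- first pass of A: build `pair` (and the open-index stack) over enumerate(s)
def stepPairA (st : PySem.Dict Int Int × List Int) (ic : Int × Char) :
    PySem.Dict Int Int × List Int :=
  if ic.2 = '(' then (st.1, ic.1 :: st.2)
  else if ic.2 = ')' then
    match st.2 with
    | [] => st                      -- Python: IndexError on stack.pop() (outside Pre_)
    | j :: rest => ((st.1.insert ic.1 j).insert j ic.1, rest)
  else st

def reverse_parentheses_1 (s : String) : String :=
  let l := s.toList
  let ps := (PySem.List.enumerate l 0).foldl stepPairA (PySem.Dict.empty, [])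
  String.mk (loopA l ps.1 (l.length + 1) 0 1 [])

-- ===== PORT B =====

def stepB (frames : List (List Char)) (c : Char) : List (List Char) :=
  if c = '(' then [] :: frames
  else if c = ')' then
    match frames with
    | t :: u :: rest => (u ++ t.reverse) :: rest
    | _ => frames                   -- Python: IndexError (outside Pre_)
  else
    match frames with
    | t :: rest => (t ++ [c]) :: rest
    | [] => frames

-- head of the list = top frame of the Python stack; Python's frames[0] is the last element
def reverse_parentheses_1_alt (s : String) : String :=
  let frames := s.toList.foldl stepB [[]]
  String.mk (frames.getLastD [])

-- ===== PRECONDITION & SPEC =====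

def cval (c : Char) : Int := if c = '(' then 1 else if c = ')' then -1 else 0

def bal (l : List Char) : Int := (l.map cval).sum

-- Pre_ = the parentheses of s are balanced: exactly the inputs where Python A returns
-- normally (on any unbalanced string A raises IndexError or KeyError).
def Pre_reverse_parentheses_1 (s : String) : Prop :=
  (∀ n, n < s.toList.length → 0 ≤ bal (s.toList.take n)) ∧ bal s.toList = 0

instance (s : String) : Decidable (Pre_reverse_parentheses_1 s) := by
  unfold Pre_reverse_parentheses_1; infer_instance

def pvWitness_reverse_parentheses_1 : String := "(a(bc)d)e"

def Spec_reverse_parentheses_1 (s : String) (out : String) : Prop := out = reverse_parentheses_1_alt s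
instance (s : String) (out : String) : Decidable (Spec_reverse_parentheses_1 s out) := by unfold Spec_reverse_parentheses_1; infer_instance

-- ===== CLAIM (what is proved, stated in full; the proofs are below) =====
def Claim_equal_reverse_parentheses_1 : Prop := ∀ (s : String), Dom_reverse_parentheses_1 s → Pre_reverse_parentheses_1 s → Spec_reverse_parentheses_1 s (reverse_parentheses_1 s)

-- ===== LEMMAS AND PROOFS =====

-- a balanced string parses into a forest: items are plain chars or parenthesized groups
inductive Forest where
  | nil : Forest
  | chr : Char → Forest → Forest
  | par : Forest → Forest → Forest
deriving DecidableEq, Repr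

def flatF : Forest → List Char
  | .nil => []
  | .chr c f => c :: flatF f
  | .par g f => '(' :: (flatF g ++ ')' :: flatF f)

def wfF : Forest → Prop
  | .nil => True
  | .chr c f => c ≠ '(' ∧ c ≠ ')' ∧ wfF f
  | .par g f => wfF g ∧ wfF f

-- the intended output of the subforest, forward (b = false) or reversed (b = true)
def outF : Forest → Bool → List Char
  | .nil, _ => []
  | .chr c f, false => c :: outF f false
  | .chr c f, true => outF f true ++ [c]
  | .par g f, false => outF g true ++ outF f false
  | .par g f, true => outF f true ++ outF g false

-- the (key, value) pairs A's first pass inserts into `pair`, in insertion order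
def pairsOf : Forest → Nat → List (Int × Int)
  | .nil, _ => []
  | .chr _ f, i => pairsOf f (i + 1)
  | .par g f, i =>
    pairsOf g (i + 1) ++
      ((((i + 1 + (flatF g).length : Nat) : Int), (i : Int)) ::
        ((i : Int), ((i + 1 + (flatF g).length : Nat) : Int)) :: pairsOf f (i + 1 + (flatF g).length + 1))

def addPairs (d : PySem.Dict Int Int) (L : List (Int × Int)) : PySem.Dict Int Int :=
  L.foldl (fun d p => d.insert p.1 p.2) d

theorem outF_reverse (F : Forest) : ∀ b, (outF F b).reverse = outF F (!b) := by
  induction F with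
  | nil => intro b; simp [outF]
  | chr c f ih => intro b; cases b <;> simp [outF, ih true, ih false]
  | par g f ihg ihf =>
    intro b
    cases b <;> simp [outF, List.reverse_append, ihg true, ihg false, ihf true, ihf false]

theorem bal_append (a b : List Char) : bal (a ++ b) = bal a + bal b := by
  simp [bal]

theorem bal_cons (c : Char) (t : List Char) : bal (c :: t) = cval c + bal t := by
  simp [bal]

theorem bal_take_succ (l : List Char) (n : Nat) (h : n < l.length) :
    bal (l.take (n + 1)) = bal (l.take n) + cval l[n] := by
  have hsplit : l.take (n + 1) = l.take n ++ [l[n]] := by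
    rw [List.take_succ, List.getElem?_eq_getElem h]
    rfl
  rw [hsplit, bal_append]
  simp [bal]

-- Existence of a parse for every balanced string
theorem balanced_exists (N : Nat) : ∀ (l : List Char), l.length ≤ N →
    (∀ n, n < l.length → 0 ≤ bal (l.take n)) → bal l = 0 →
    ∃ F, wfF F ∧ flatF F = l := by
  induction N with
  | zero =>
    intro l hl _ _
    have : l = [] := List.eq_nil_of_length_eq_zero (by omega)
    exact ⟨.nil, trivial, by simp [flatF, this]⟩
  | succ N ih =>
    intro l hl h1 h2
    match l with
    | [] => exact ⟨.nil, trivial, rfl⟩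
    | c :: r =>
      by_cases hcp : c = '('
      · -- find the matching ')': least k with bal (r.take k) = -1
        subst hcp
        have hbr : bal r = -1 := by
          rw [bal_cons] at h2; simp [cval] at h2; omega
        have hex : ∃ k, bal (r.take k) = -1 := ⟨r.length, by simpa using hbr⟩
        classical
        set K := Nat.find hex with hKdef
        have hK : bal (r.take K) = -1 := Nat.find_spec hex
        have hKmin : ∀ m, m < K → bal (r.take m) ≠ -1 := fun m hm => Nat.find_min hex hm
        have hKpos : 0 < K := by
          rcases Nat.eq_zero_or_pos K with h | h
          · exfalso; rw [h] at hK; simp [bal] at hK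
          · exact h
        have hKle : K ≤ r.length := by
          by_contra hlt
          push_neg at hlt
          have heq : r.take K = r := List.take_of_length_le (by omega)
          rw [heq] at hK
          have h' := hKmin r.length hlt
          rw [List.take_of_length_le (le_refl _)] at h'
          exact h' hK
        -- prefixes of r have bal ≥ -1, and ≥ 0 strictly before K
        have hpre : ∀ n, n ≤ r.length → -1 ≤ bal (r.take n) := by
          intro n hn
          rcases Nat.lt_or_ge n r.length with h | h
          · have h' := h1 (n + 1) (by simp; omega)
            rw [List.take_succ_cons, bal_cons] at h'
            simp [cval] at h'
            omega
          · have heq : r.take n = r := List.take_of_length_le (by omega)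
            rw [heq]; omega
        have hpre0 : ∀ n, n < K → 0 ≤ bal (r.take n) := by
          intro n hn
          have h1' := hpre n (by omega)
          have h2' := hKmin n hn
          omega
        -- the char at K-1 is ')' and bal (r.take (K-1)) = 0
        have hK1lt : K - 1 < r.length := by omega
        have hstep : bal (r.take K) = bal (r.take (K - 1)) + cval r[K - 1] := by
          have h' := bal_take_succ r (K - 1) hK1lt
          rw [show K - 1 + 1 = K by omega] at h'
          exact h'
        have hprev : 0 ≤ bal (r.take (K - 1)) := hpre0 (K - 1) (by omega)
        have hor : 0 ≤ cval r[K - 1] ∨ r[K - 1] = ')' := by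
          unfold cval
          split_ifs with hA hB
          · exact Or.inl (by omega)
          · exact Or.inr hB
          · exact Or.inl le_rfl
        have hclose1 : r[K - 1] = ')' := by
          rcases hor with h | h
          · exfalso; omega
          · exact h
        have hcv : cval r[K - 1] = -1 := by rw [hclose1]; simp [cval]
        have hclose2 : bal (r.take (K - 1)) = 0 := by omega
        -- split r = g ++ ')' :: f
        have hsplit : r = r.take (K - 1) ++ ')' :: r.drop K := by
          conv_lhs => rw [← List.take_append_drop (K - 1) r]
          congr 1
          rw [List.drop_eq_getElem_cons hK1lt, hclose1]
          congr 2
          omega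
        set g := r.take (K - 1) with hg
        set f := r.drop K with hf
        have hglen : g.length = K - 1 := by rw [hg]; simp; omega
        have hflen : f.length = r.length - K := by rw [hf]; simp
        -- g is balanced
        have hgbal : bal g = 0 := hclose2
        have hgpre : ∀ n, n < g.length → 0 ≤ bal (g.take n) := by
          intro n hn
          have heq : g.take n = r.take n := by
            rw [hg, List.take_take]; congr 1; omega
          rw [heq]; exact hpre0 n (by omega)
        -- f is balanced
        have hfbal : bal f = 0 := by
          have hsum : bal r = bal (r.take K) + bal f := by
            conv_lhs => rw [← List.take_append_drop K r]
            rw [bal_append]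
          omega
        have hfpre : ∀ n, n < f.length → 0 ≤ bal (f.take n) := by
          intro n hn
          have htk : r.take (K + n) = r.take K ++ f.take n := by
            rw [hf, List.take_add]
          have h1' := hpre (K + n) (by omega)
          rw [htk, bal_append] at h1'
          omega
        have hlen : r.length ≤ N := by simp at hl; omega
        obtain ⟨G, hGwf, hGflat⟩ := ih g (by omega) hgpre hgbal
        obtain ⟨F, hFwf, hFflat⟩ := ih f (by omega) hfpre hfbal
        refine ⟨.par G F, ⟨hGwf, hFwf⟩, ?_⟩
        simp only [flatF, hGflat, hFflat]
        rw [← hsplit]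
      · by_cases hcc : c = ')'
        · exfalso
          subst hcc
          have h' : 0 ≤ bal ((')' :: r).take 1) ∨ (')' :: r).length ≤ 1 := by
            rcases Nat.lt_or_ge 1 ((')' :: r).length) with h | h
            · exact Or.inl (h1 1 h)
            · exact Or.inr h
          rcases h' with h' | h'
          · rw [List.take_succ_cons, List.take_zero, bal_cons] at h'
            simp [bal, cval] at h'
          · have hr : r = [] := by simpa using h'
            subst hr
            rw [bal_cons] at h2; simp [bal, cval] at h2
        · have hcv : cval c = 0 := by simp [cval, hcp, hcc]
          have hrbal : bal r = 0 := by rw [bal_cons, hcv] at h2; omega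
          have hrpre : ∀ n, n < r.length → 0 ≤ bal (r.take n) := by
            intro n hn
            have h' := h1 (n + 1) (by simp; omega)
            rw [List.take_succ_cons, bal_cons, hcv] at h'
            omega
          obtain ⟨F, hwf, hflat⟩ := ih r (by simp at hl; omega) hrpre hrbal
          exact ⟨.chr c F, ⟨hcp, hcc, hwf⟩, by simp [flatF, hflat]⟩

-- == first pass of A computes exactly pairsOf ==

theorem foldPair_flat (F : Forest) (hw : wfF F) :
    ∀ (off : Nat) (st : PySem.Dict Int Int × List Int),
      (PySem.List.enumerate (flatF F) (off : Int)).foldl stepPairA st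
        = (addPairs st.1 (pairsOf F off), st.2) := by
  induction F with
  | nil => intro off st; simp [flatF, pairsOf, addPairs, PySem.List.enumerate_nil]
  | chr c f ih =>
    intro off st
    obtain ⟨h1, h2, hw'⟩ := hw
    simp only [flatF, PySem.List.enumerate_cons, List.foldl_cons]
    have hstep : stepPairA st ((off : Int), c) = st := by
      simp [stepPairA, h1, h2]
    rw [hstep, show ((off : Int) + 1) = ((off + 1 : Nat) : Int) by push_cast; ring,
      ih hw' (off + 1) st]
    rfl
  | par g f ihg ihf =>
    intro off st
    obtain ⟨hwg, hwf'⟩ := hw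
    simp only [flatF, PySem.List.enumerate_cons, List.foldl_cons]
    have h0 : stepPairA st ((off : Int), '(') = (st.1, (off : Int) :: st.2) := by
      simp [stepPairA]
    rw [h0, show ((off : Int) + 1) = ((off + 1 : Nat) : Int) by push_cast; ring,
      PySem.List.enumerate_append, List.foldl_append, ihg hwg (off + 1) _,
      PySem.List.enumerate_cons, List.foldl_cons]
    have h1 : stepPairA (addPairs st.1 (pairsOf g (off + 1)), (off : Int) :: st.2)
        (((off + 1 : Nat) : Int) + (flatF g).length, ')')
        = (((addPairs st.1 (pairsOf g (off + 1))).insert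
              (((off + 1 : Nat) : Int) + (flatF g).length) (off : Int)).insert
            (off : Int) (((off + 1 : Nat) : Int) + (flatF g).length), st.2) := by
      simp [stepPairA]
    rw [h1, show (((off + 1 : Nat) : Int) + ((flatF g).length : Int)) + 1
          = ((off + 1 + (flatF g).length + 1 : Nat) : Int) by push_cast; ring,
      ihf hwf' (off + 1 + (flatF g).length + 1) _]
    simp only [pairsOf, addPairs, List.foldl_append, List.foldl_cons]
    congr 3 <;> push_cast <;> ring

-- == lookups in the dict built by foldl insert ==

theorem get?_addPairs_not_mem (L : List (Int × Int)) (d : PySem.Dict Int Int) (k : Int)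
    (hk : k ∉ L.map Prod.fst) : (addPairs d L).get? k = d.get? k := by
  induction L generalizing d with
  | nil => rfl
  | cons p L ih =>
    simp only [List.map_cons, List.mem_cons] at hk
    push_neg at hk
    have hstep : addPairs d (p :: L) = addPairs (d.insert p.1 p.2) L := rfl
    rw [hstep, ih _ hk.2, PySem.Dict.get?_insert, if_neg hk.1]

theorem get?_addPairs (L : List (Int × Int)) (hnd : (L.map Prod.fst).Nodup)
    (d : PySem.Dict Int Int) (p : Int × Int) (hp : p ∈ L) :
    (addPairs d L).get? p.1 = some p.2 := by
  induction L generalizing d with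
  | nil => cases hp
  | cons q L ih =>
    simp only [List.map_cons, List.nodup_cons] at hnd
    have hstep : addPairs d (q :: L) = addPairs (d.insert q.1 q.2) L := rfl
    rw [hstep]
    rcases List.mem_cons.mp hp with heq | hp'
    · subst heq
      rw [get?_addPairs_not_mem _ _ _ hnd.1, PySem.Dict.get?_insert_self]
    · exact ih hnd.2 _ hp'

theorem pairsOf_bounds (F : Forest) :
    ∀ (off : Nat) (p : Int × Int), p ∈ pairsOf F off →
      (off : Int) ≤ p.1 ∧ p.1 < (off : Int) + (flatF F).length ∧
      (off : Int) ≤ p.2 ∧ p.2 < (off : Int) + (flatF F).length := by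
  induction F with
  | nil => intro off p h; cases h
  | chr c f ih =>
    intro off p h
    simp only [pairsOf] at h
    have h' := ih (off + 1) p h
    simp only [flatF, List.length_cons]
    push_cast at h' ⊢
    omega
  | par g f ihg ihf =>
    intro off p h
    simp only [pairsOf, List.mem_append, List.mem_cons] at h
    simp only [flatF, List.length_cons, List.length_append]
    rcases h with h | rfl | rfl | h
    · have h' := ihg (off + 1) p h; push_cast at h' ⊢; omega
    · push_cast; omega
    · push_cast; omega
    · have h' := ihf (off + 1 + (flatF g).length + 1) p h
      push_cast at h' ⊢; omega

theorem pairsOf_nodup (F : Forest) :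
    ∀ (off : Nat), ((pairsOf F off).map Prod.fst).Nodup := by
  induction F with
  | nil => intro off; simp [pairsOf]
  | chr c f ih => intro off; simp only [pairsOf]; exact ih (off + 1)
  | par g f ihg ihf =>
    intro off
    have hg := ihg (off + 1)
    have hf := ihf (off + 1 + (flatF g).length + 1)
    simp only [pairsOf, List.map_append, List.map_cons]
    refine List.Nodup.append hg ?_ ?_
    · rw [List.nodup_cons, List.nodup_cons]
      refine ⟨?_, ?_, hf⟩
      · intro hmem
        rcases List.mem_cons.mp hmem with heq | hmem'
        · push_cast at heq; omega
        · obtain ⟨p, hp, hfst⟩ := List.mem_map.mp hmem'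
          have hb := pairsOf_bounds f _ p hp
          push_cast at hb hfst
          omega
      · intro hmem
        obtain ⟨p, hp, hfst⟩ := List.mem_map.mp hmem
        have hb := pairsOf_bounds f _ p hp
        push_cast at hb hfst
        omega
    · intro a hag hb
      obtain ⟨p, hp, hfst⟩ := List.mem_map.mp hag
      have hbg := pairsOf_bounds g _ p hp
      rcases List.mem_cons.mp hb with heq | hb'
      · subst heq; push_cast at hbg hfst; omega
      rcases List.mem_cons.mp hb' with heq | hb''
      · subst heq; push_cast at hbg hfst; omega
      · obtain ⟨q, hq, hqf⟩ := List.mem_map.mp hb''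
        have hbf := pairsOf_bounds f _ q hq
        push_cast at hbg hbf hfst hqf
        omega

-- == one-step reductions of A's loop ==

theorem loopA_stop (l : List Char) (d : PySem.Dict Int Int) (fuel : Nat) (i dir : Int)
    (acc : List Char) (h : ¬ i < (l.length : Int)) :
    loopA l d (fuel + 1) i dir acc = acc := by
  simp only [loopA]
  rw [if_neg h]

theorem loopA_step_char (l : List Char) (d : PySem.Dict Int Int) (fuel : Nat) (i dir : Int)
    (acc : List Char) (c : Char) (hlt : i < (l.length : Int))
    (hget : PySem.List.pyGet? l i = some c) (hc1 : c ≠ '(') (hc2 : c ≠ ')') :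
    loopA l d (fuel + 1) i dir acc = loopA l d fuel (i + dir) dir (acc ++ [c]) := by
  simp only [loopA]
  rw [if_pos hlt, hget]
  simp [hc1, hc2]

theorem loopA_step_jump (l : List Char) (d : PySem.Dict Int Int) (fuel : Nat) (i dir : Int)
    (acc : List Char) (c : Char) (j : Int) (hlt : i < (l.length : Int))
    (hget : PySem.List.pyGet? l i = some c) (hc : c = '(' ∨ c = ')')
    (hj : d.get? i = some j) :
    loopA l d (fuel + 1) i dir acc = loopA l d fuel (j + -dir) (-dir) acc := by
  simp only [loopA]
  rw [if_pos hlt, hget]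
  simp [hc, hj]

-- == the wormhole traversal of A on a parsed region ==

theorem loopA_fb (d : PySem.Dict Int Int) (F : Forest) (hw : wfF F) :
    (∀ (pre post acc : List Char) (fuel : Nat),
      (∀ p ∈ pairsOf F pre.length, d.get? p.1 = some p.2) →
      loopA (pre ++ flatF F ++ post) d ((flatF F).length + fuel) (pre.length) 1 acc
        = loopA (pre ++ flatF F ++ post) d fuel ((pre.length : Int) + (flatF F).length) 1
            (acc ++ outF F false)) ∧
    (∀ (pre post acc : List Char) (fuel : Nat),
      (∀ p ∈ pairsOf F pre.length, d.get? p.1 = some p.2) →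
      loopA (pre ++ flatF F ++ post) d ((flatF F).length + fuel)
          ((pre.length : Int) + (flatF F).length - 1) (-1) acc
        = loopA (pre ++ flatF F ++ post) d fuel ((pre.length : Int) - 1) (-1)
            (acc ++ outF F true)) := by
  induction F with
  | nil =>
    constructor <;> intro pre post acc fuel _ <;> simp [flatF, outF]
  | chr c f ih =>
    obtain ⟨h1, h2, hw'⟩ := hw
    obtain ⟨ihF, ihB⟩ := ih hw'
    constructor
    · intro pre post acc fuel hp
      have hp' : ∀ p ∈ pairsOf f (pre ++ [c]).length, d.get? p.1 = some p.2 := by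
        intro p hpm
        apply hp
        simp only [pairsOf]
        simpa [List.length_append] using hpm
      have hL : pre ++ flatF (Forest.chr c f) ++ post = (pre ++ [c]) ++ flatF f ++ post := by
        simp [flatF]
      have hget : PySem.List.pyGet? (pre ++ flatF (Forest.chr c f) ++ post)
          (pre.length : Int) = some c := by
        rw [show pre ++ flatF (Forest.chr c f) ++ post = pre ++ c :: (flatF f ++ post) by
          simp [flatF]]
        exact PySem.List.pyGet?_append_length ..
      have hlt : (pre.length : Int) < ((pre ++ flatF (Forest.chr c f) ++ post).length : Int) := by
        simp only [flatF, List.length_append, List.length_cons]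
        push_cast
        omega
      rw [show (flatF (Forest.chr c f)).length + fuel = ((flatF f).length + fuel) + 1 by
        simp only [flatF, List.length_cons]; omega]
      rw [loopA_step_char _ _ _ _ _ _ c hlt hget h1 h2]
      rw [show (pre.length : Int) + 1 = ((pre ++ [c]).length : Int) by simp]
      have hstep := ihF (pre ++ [c]) post (acc ++ [c]) fuel hp'
      rw [← hL] at hstep
      rw [hstep]
      rw [show ((pre ++ [c]).length : Int) + ((flatF f).length : Int)
            = (pre.length : Int) + ((flatF (Forest.chr c f)).length : Int) by
        simp only [flatF, List.length_append, List.length_cons, List.length_nil]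
        push_cast; omega]
      congr 1
      simp [outF]
    · intro pre post acc fuel hp
      have hp' : ∀ p ∈ pairsOf f (pre ++ [c]).length, d.get? p.1 = some p.2 := by
        intro p hpm
        apply hp
        simp only [pairsOf]
        simpa [List.length_append] using hpm
      have hL : pre ++ flatF (Forest.chr c f) ++ post = (pre ++ [c]) ++ flatF f ++ post := by
        simp [flatF]
      have hget : PySem.List.pyGet? (pre ++ flatF (Forest.chr c f) ++ post)
          (pre.length : Int) = some c := by
        rw [show pre ++ flatF (Forest.chr c f) ++ post = pre ++ c :: (flatF f ++ post) by
          simp [flatF]]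
        exact PySem.List.pyGet?_append_length ..
      have hlt : (pre.length : Int) < ((pre ++ flatF (Forest.chr c f) ++ post).length : Int) := by
        simp only [flatF, List.length_append, List.length_cons]
        push_cast
        omega
      rw [show (flatF (Forest.chr c f)).length + fuel = (flatF f).length + (fuel + 1) by
        simp only [flatF, List.length_cons]; omega]
      rw [show (pre.length : Int) + ((flatF (Forest.chr c f)).length : Int) - 1
            = ((pre ++ [c]).length : Int) + ((flatF f).length : Int) - 1 by
        simp only [flatF, List.length_append, List.length_cons, List.length_nil]
        push_cast; omega]
      have hstep := ihB (pre ++ [c]) post acc (fuel + 1) hp'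
      rw [← hL] at hstep
      rw [hstep]
      rw [show ((pre ++ [c]).length : Int) - 1 = (pre.length : Int) by simp]
      rw [loopA_step_char _ _ _ _ _ _ c hlt hget h1 h2]
      rw [show (pre.length : Int) + -1 = (pre.length : Int) - 1 by ring]
      congr 1
      simp [outF]
  | par g f ihg ihf =>
    obtain ⟨hwg, hwf'⟩ := hw
    obtain ⟨ihgF, ihgB⟩ := ihg hwg
    obtain ⟨ihfF, ihfB⟩ := ihf hwf'
    have hcommon : ∀ (pre post : List Char),
        (∀ p ∈ pairsOf (Forest.par g f) pre.length, d.get? p.1 = some p.2) →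
        (∀ p ∈ pairsOf g (pre ++ ['(']).length, d.get? p.1 = some p.2) ∧
        (∀ p ∈ pairsOf f (pre ++ '(' :: flatF g ++ [')']).length, d.get? p.1 = some p.2) ∧
        d.get? (pre.length : Int) = some ((pre.length + 1 + (flatF g).length : Nat) : Int) ∧
        d.get? ((pre.length + 1 + (flatF g).length : Nat) : Int) = some (pre.length : Int) := by
      intro pre post hp
      refine ⟨?_, ?_, ?_, ?_⟩
      · intro p hpm
        apply hp
        simp only [pairsOf, List.mem_append, List.mem_cons]
        left
        simpa [List.length_append] using hpm
      · intro p hpm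
        apply hp
        simp only [pairsOf, List.mem_append, List.mem_cons]
        right; right; right
        have hlen : (pre ++ '(' :: flatF g ++ [')']).length
            = pre.length + 1 + (flatF g).length + 1 := by simp; omega
        rwa [hlen] at hpm
      · apply hp ((pre.length : Int), ((pre.length + 1 + (flatF g).length : Nat) : Int))
        simp only [pairsOf, List.mem_append, List.mem_cons]
        right; right; left; trivial
      · apply hp (((pre.length + 1 + (flatF g).length : Nat) : Int), (pre.length : Int))
        simp only [pairsOf, List.mem_append, List.mem_cons]
        right; left; trivial
    constructor
    · intro pre post acc fuel hp
      obtain ⟨hpg, hpf, hpo, hpc⟩ := hcommon pre post hp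
      have hL1 : pre ++ flatF (Forest.par g f) ++ post
          = (pre ++ ['(']) ++ flatF g ++ (')' :: (flatF f ++ post)) := by simp [flatF]
      have hL2 : pre ++ flatF (Forest.par g f) ++ post
          = (pre ++ '(' :: flatF g ++ [')']) ++ flatF f ++ post := by simp [flatF]
      have hget1 : PySem.List.pyGet? (pre ++ flatF (Forest.par g f) ++ post)
          (pre.length : Int) = some '(' := by
        rw [show pre ++ flatF (Forest.par g f) ++ post
              = pre ++ '(' :: (flatF g ++ ')' :: flatF f ++ post) by simp [flatF]]
        exact PySem.List.pyGet?_append_length ..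
      have hget2 : PySem.List.pyGet? (pre ++ flatF (Forest.par g f) ++ post)
          ((pre ++ '(' :: flatF g).length : Int) = some ')' := by
        rw [show pre ++ flatF (Forest.par g f) ++ post
              = (pre ++ '(' :: flatF g) ++ ')' :: (flatF f ++ post) by simp [flatF]]
        exact PySem.List.pyGet?_append_length ..
      rw [show ((pre ++ '(' :: flatF g).length : Int)
            = ((pre.length + 1 + (flatF g).length : Nat) : Int) by
        simp only [List.length_append, List.length_cons]; push_cast; omega] at hget2
      have hlenL : ((pre ++ flatF (Forest.par g f) ++ post).length : Int)
          = (pre.length : Int) + (2 + ((flatF g).length : Int) + ((flatF f).length : Int))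
            + (post.length : Int) := by
        simp only [flatF, List.length_append, List.length_cons]
        push_cast; omega
      have hltA : (pre.length : Int) < ((pre ++ flatF (Forest.par g f) ++ post).length : Int) := by
        rw [hlenL]; omega
      have hltC : ((pre.length + 1 + (flatF g).length : Nat) : Int)
          < ((pre ++ flatF (Forest.par g f) ++ post).length : Int) := by
        rw [hlenL]; push_cast; omega
      rw [show (flatF (Forest.par g f)).length + fuel
            = ((flatF g).length + (1 + ((flatF f).length + fuel))) + 1 by
        simp only [flatF, List.length_cons, List.length_append]; omega]
      rw [loopA_step_jump _ _ _ _ _ _ '(' _ hltA hget1 (Or.inl rfl) hpo]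
      rw [show ((pre.length + 1 + (flatF g).length : Nat) : Int) + -(1 : Int)
            = ((pre ++ ['(']).length : Int) + ((flatF g).length : Int) - 1 by
        simp only [List.length_append, List.length_cons, List.length_nil]
        push_cast; omega]
      have hbg := ihgB (pre ++ ['(']) (')' :: (flatF f ++ post)) acc
        (1 + ((flatF f).length + fuel)) hpg
      rw [← hL1] at hbg
      rw [hbg]
      rw [show ((pre ++ ['(']).length : Int) - 1 = (pre.length : Int) by simp]
      rw [show 1 + ((flatF f).length + fuel) = ((flatF f).length + fuel) + 1 by omega]
      rw [loopA_step_jump _ _ _ _ _ _ '(' _ hltA hget1 (Or.inl rfl) hpo]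
      rw [show ((pre.length + 1 + (flatF g).length : Nat) : Int) + - -(1 : Int)
            = ((pre ++ '(' :: flatF g ++ [')']).length : Int) by
        simp only [List.length_append, List.length_cons, List.length_nil]
        push_cast; omega]
      rw [show (- -(1 : Int)) = (1 : Int) by ring]
      have hff := ihfF (pre ++ '(' :: flatF g ++ [')']) post (acc ++ outF g true) fuel hpf
      rw [← hL2] at hff
      rw [hff]
      rw [show ((pre ++ '(' :: flatF g ++ [')']).length : Int) + ((flatF f).length : Int)
            = (pre.length : Int) + ((flatF (Forest.par g f)).length : Int) by
        simp only [flatF, List.length_append, List.length_cons, List.length_nil]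
        push_cast; omega]
      congr 1
      simp [outF]
    · intro pre post acc fuel hp
      obtain ⟨hpg, hpf, hpo, hpc⟩ := hcommon pre post hp
      have hL1 : pre ++ flatF (Forest.par g f) ++ post
          = (pre ++ ['(']) ++ flatF g ++ (')' :: (flatF f ++ post)) := by simp [flatF]
      have hL2 : pre ++ flatF (Forest.par g f) ++ post
          = (pre ++ '(' :: flatF g ++ [')']) ++ flatF f ++ post := by simp [flatF]
      have hget2 : PySem.List.pyGet? (pre ++ flatF (Forest.par g f) ++ post)
          ((pre ++ '(' :: flatF g).length : Int) = some ')' := by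
        rw [show pre ++ flatF (Forest.par g f) ++ post
              = (pre ++ '(' :: flatF g) ++ ')' :: (flatF f ++ post) by simp [flatF]]
        exact PySem.List.pyGet?_append_length ..
      rw [show ((pre ++ '(' :: flatF g).length : Int)
            = ((pre.length + 1 + (flatF g).length : Nat) : Int) by
        simp only [List.length_append, List.length_cons]; push_cast; omega] at hget2
      have hlenL : ((pre ++ flatF (Forest.par g f) ++ post).length : Int)
          = (pre.length : Int) + (2 + ((flatF g).length : Int) + ((flatF f).length : Int))
            + (post.length : Int) := by
        simp only [flatF, List.length_append, List.length_cons]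
        push_cast; omega
      have hltC : ((pre.length + 1 + (flatF g).length : Nat) : Int)
          < ((pre ++ flatF (Forest.par g f) ++ post).length : Int) := by
        rw [hlenL]; push_cast; omega
      rw [show (flatF (Forest.par g f)).length + fuel
            = (flatF f).length + (1 + ((flatF g).length + (1 + fuel))) by
        simp only [flatF, List.length_cons, List.length_append]; omega]
      rw [show (pre.length : Int) + ((flatF (Forest.par g f)).length : Int) - 1
            = ((pre ++ '(' :: flatF g ++ [')']).length : Int) + ((flatF f).length : Int) - 1 by
        simp only [flatF, List.length_append, List.length_cons, List.length_nil]
        push_cast; omega]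
      have hbf := ihfB (pre ++ '(' :: flatF g ++ [')']) post acc
        (1 + ((flatF g).length + (1 + fuel))) hpf
      rw [← hL2] at hbf
      rw [hbf]
      rw [show ((pre ++ '(' :: flatF g ++ [')']).length : Int) - 1
            = ((pre.length + 1 + (flatF g).length : Nat) : Int) by
        simp only [List.length_append, List.length_cons, List.length_nil]
        push_cast; omega]
      rw [show 1 + ((flatF g).length + (1 + fuel)) = ((flatF g).length + (1 + fuel)) + 1 by omega]
      rw [loopA_step_jump _ _ _ _ _ _ ')' _ hltC hget2 (Or.inr rfl) hpc]
      rw [show (pre.length : Int) + - -(1 : Int) = ((pre ++ ['(']).length : Int) by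
        simp only [List.length_append, List.length_cons, List.length_nil]
        push_cast; omega]
      rw [show (- -(1 : Int)) = (1 : Int) by ring]
      have hfg := ihgF (pre ++ ['(']) (')' :: (flatF f ++ post)) (acc ++ outF f true) (1 + fuel) hpg
      rw [← hL1] at hfg
      rw [hfg]
      rw [show ((pre ++ ['(']).length : Int) + ((flatF g).length : Int)
            = ((pre.length + 1 + (flatF g).length : Nat) : Int) by
        simp only [List.length_append, List.length_cons, List.length_nil]
        push_cast; omega]
      rw [show 1 + fuel = fuel + 1 by omega]
      rw [loopA_step_jump _ _ _ _ _ _ ')' _ hltC hget2 (Or.inr rfl) hpc]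
      rw [show (pre.length : Int) + -(1 : Int) = (pre.length : Int) - 1 by ring]
      congr 1
      simp [outF]

theorem foldB_flat (F : Forest) (hw : wfF F) :
    ∀ (rest t : List Char) (ts : List (List Char)),
      (flatF F ++ rest).foldl stepB (t :: ts) = rest.foldl stepB ((t ++ outF F false) :: ts) := by
  induction F with
  | nil => intro rest t ts; simp [flatF, outF]
  | chr c f ih =>
    obtain ⟨h1, h2, hw'⟩ := hw
    intro rest t ts
    simp only [flatF, List.cons_append, List.foldl_cons]
    rw [show stepB (t :: ts) c = (t ++ [c]) :: ts by simp [stepB, h1, h2]]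
    rw [ih hw' rest (t ++ [c]) ts]
    simp [outF]
  | par g f ihg ihf =>
    obtain ⟨hwg, hwf'⟩ := hw
    intro rest t ts
    simp only [flatF, List.cons_append, List.append_assoc, List.foldl_cons]
    rw [show stepB (t :: ts) '(' = [] :: t :: ts by simp [stepB]]
    rw [ihg hwg (')' :: (flatF f ++ rest)) [] (t :: ts), List.foldl_cons]
    rw [show stepB (([] ++ outF g false) :: t :: ts) ')'
          = (t ++ (outF g false).reverse) :: ts by simp [stepB]]
    rw [show (outF g false).reverse = outF g true by simpa using outF_reverse g false]
    rw [ihf hwf' rest (t ++ outF g true) ts]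
    simp [outF]

-- ===== VERDICT (by name: the statement is the Claim_ definition above) =====
theorem reverse_parentheses_1_spec : Claim_equal_reverse_parentheses_1 := by
  intro s _ hpre
  unfold Spec_reverse_parentheses_1
  obtain ⟨F, hwf, hflat⟩ :=
    balanced_exists s.toList.length s.toList le_rfl hpre.1 hpre.2
  -- A's first pass builds exactly the matching-pair dictionary of F
  have hfold := foldPair_flat F hwf 0 (PySem.Dict.empty, [])
  rw [hflat] at hfold
  have hfold2 : (PySem.List.enumerate s.toList 0).foldl stepPairA (PySem.Dict.empty, [])
      = (addPairs PySem.Dict.empty (pairsOf F 0), ([] : List Int)) := by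
    simpa using hfold
  have hp : ∀ p ∈ pairsOf F 0, (addPairs PySem.Dict.empty (pairsOf F 0)).get? p.1 = some p.2 :=
    fun p hp => get?_addPairs _ (pairsOf_nodup F 0) _ p hp
  -- A's traversal produces outF F false
  have hfb := (loopA_fb (addPairs PySem.Dict.empty (pairsOf F 0)) F hwf).1 [] [] [] 1
    (by simpa using hp)
  simp only [List.nil_append, List.append_nil, List.length_nil, Nat.cast_zero, zero_add] at hfb
  rw [hflat] at hfb
  have hstop : loopA s.toList (addPairs PySem.Dict.empty (pairsOf F 0)) 1
      ((s.toList.length : Nat) : Int) 1 (outF F false) = outF F false :=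
    loopA_stop _ _ 0 _ _ _ (by omega)
  -- B's fold produces outF F false as well
  have hB := foldB_flat F hwf [] [] []
  rw [List.append_nil, hflat] at hB
  simp only [List.foldl_nil, List.nil_append] at hB
  simp only [reverse_parentheses_1, reverse_parentheses_1_alt]
  rw [hfold2]
  rw [show ((addPairs PySem.Dict.empty (pairsOf F 0), ([] : List Int)).1)
        = addPairs PySem.Dict.empty (pairsOf F 0) from rfl]
  rw [hfb, hstop, hB]
  simp
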